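-- pv_equiv track=rewrite | github.com/DieterJoubert/advent_of_code | 2023/day_02.py | get_possible_game_indexes
-- ===== SOURCE A (Python) =====
-- BAG_CONTENT = {
-- 	'red': 12,
-- 	'green': 13,
-- 	'blue': 14
-- }
--
-- def get_possible_game_indexes(data):
-- 	possible_games = []
--
-- 	for idx in range(len(data)):
-- 		game = data[idx]
--
-- 		possible = True
--
-- 		for reveal in game:
-- 			for color, num in reveal.items():
-- 				if BAG_CONTENT[color] < num:
-- 					possible = False
-- 					break
--
-- 		if possible:
-- 			possible_games.append(idx+1)
--
-- 	return possible_games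
-- ===== SOURCE B (Python) =====
-- BAG_CONTENT = {
-- 	'red': 12,
-- 	'green': 13,
-- 	'blue': 14
-- }
--
-- def get_possible_game_indexes(data):
-- 	result = []
-- 	for idx, game in enumerate(data, start=1):
-- 		maxes = {}
-- 		for reveal in game:
-- 			for color, num in reveal.items():
-- 				maxes[color] = max(maxes.get(color, num), num)
-- 		if all(count <= BAG_CONTENT[color] for color, count in maxes.items()):
-- 			result.append(idx)
-- 	return result
-- ===== Notes on version B (the rewrite author's own statement) =====
-- stated objective: alternative
-- what changed: B replaces A's break-out boolean flag scanned item by item with a two-phase reduction per game: first build a dict of the maximum count seen per color, then check that dict against BAG_CONTENT in a separate pass.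
-- outside the precondition, e.g. on get_possible_game_indexes([[{'red': 20, 'blob': 1}]]): A returns [], B returns []
import Mathlib
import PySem

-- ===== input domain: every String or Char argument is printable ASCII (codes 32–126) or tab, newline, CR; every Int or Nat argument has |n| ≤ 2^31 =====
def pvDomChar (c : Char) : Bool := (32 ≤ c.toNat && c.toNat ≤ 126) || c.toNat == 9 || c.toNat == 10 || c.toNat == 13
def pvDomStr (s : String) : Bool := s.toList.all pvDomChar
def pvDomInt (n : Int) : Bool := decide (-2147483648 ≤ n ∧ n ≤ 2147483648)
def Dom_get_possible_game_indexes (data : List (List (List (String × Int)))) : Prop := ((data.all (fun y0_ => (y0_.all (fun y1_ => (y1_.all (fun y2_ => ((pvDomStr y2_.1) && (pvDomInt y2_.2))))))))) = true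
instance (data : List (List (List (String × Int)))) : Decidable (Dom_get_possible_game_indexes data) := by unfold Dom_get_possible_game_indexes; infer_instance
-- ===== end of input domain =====

-- B replaces A's break-out boolean flag with a per-game max-per-color dict checked against BAG_CONTENT in a second pass (alternative decomposition, same cost).


-- ===== PORT A =====
def BAG : PySem.Dict String Int := PySem.Dict.ofList [("red", 12), ("green", 13), ("blue", 14)]

-- inner 'for color, num in reveal.items(): if BAG_CONTENT[color] < num: possible = False; break'
-- (BAG.getD c 0: Pre_ guarantees every color is a key of BAG, so the KeyError case never fires)
def revealLoopA (possible : Bool) (reveal : List (String × Int)) : Bool :=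
  match reveal with
  | [] => possible
  | (c, n) :: rest => if BAG.getD c 0 < n then false else revealLoopA possible rest

-- 'for idx in range(len(data)): …' as a structural walk carrying the same idx
def gamesLoopA (idx : Int) (games : List (List (List (String × Int)))) (acc : List Int) : List Int :=
  match games with
  | [] => acc
  | game :: rest =>
      let possible := game.foldl (fun p reveal => revealLoopA p reveal) true
      gamesLoopA (idx + 1) rest (if possible then acc ++ [idx + 1] else acc)

def get_possible_game_indexes (data : List (List (List (String × Int)))) : List Int :=
  gamesLoopA 0 data []

-- ===== PORT B =====
-- maxes[color] = max(maxes.get(color, num), num) over all items of the game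
def maxesOf (game : List (List (String × Int))) : PySem.Dict String Int :=
  game.foldl (fun d reveal =>
    reveal.foldl (fun d p => d.insert p.1 (max (d.getD p.1 p.2) p.2)) d) PySem.Dict.empty

-- 'all(count <= BAG_CONTENT[color] for color, count in maxes.items())'
def allWithinBag (maxes : PySem.Dict String Int) : Bool :=
  maxes.items.all (fun p => decide (p.2 ≤ BAG.getD p.1 0))

def gamesLoopB (idx : Int) (games : List (List (List (String × Int)))) (acc : List Int) : List Int :=
  match games with
  | [] => acc
  | game :: rest =>
      gamesLoopB (idx + 1) rest (if allWithinBag (maxesOf game) then acc ++ [idx] else acc)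

def get_possible_game_indexes_alt (data : List (List (List (String × Int)))) : List Int :=
  gamesLoopB 1 data []

-- ===== PRECONDITION & SPEC =====
-- Pre_ excludes (i) inputs mentioning a color outside BAG_CONTENT: A in general raises KeyError there, and
-- when an earlier over-limit entry shadows the unknown color A still returns a value only by an accident of
-- its break (B's short-circuiting all() happens to return the same value there); and (ii) reveals whose association
-- list has duplicate color keys, which a Python dict cannot represent.
def Pre_get_possible_game_indexes (data : List (List (List (String × Int)))) : Prop :=
  ∀ game ∈ data, ∀ reveal ∈ game,
    (∀ p ∈ reveal, p.1 = "red" ∨ p.1 = "green" ∨ p.1 = "blue") ∧ (reveal.map Prod.fst).Nodup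
instance (data : List (List (List (String × Int)))) : Decidable (Pre_get_possible_game_indexes data) := by
  unfold Pre_get_possible_game_indexes; infer_instance
def pvWitness_get_possible_game_indexes : (List (List (List (String × Int)))) :=
  [[[("red", 3), ("blue", 2)]], [[("green", 99)]]]
def Spec_get_possible_game_indexes (data : List (List (List (String × Int)))) (out : List Int) : Prop := out = get_possible_game_indexes_alt data
instance (data : List (List (List (String × Int)))) (out : List Int) : Decidable (Spec_get_possible_game_indexes data out) := by unfold Spec_get_possible_game_indexes; infer_instance

-- ===== CLAIM (what is proved, stated in full; the proofs are below) =====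
def Claim_equal_get_possible_game_indexes : Prop := ∀ (data : List (List (List (String × Int)))), Dom_get_possible_game_indexes data → Pre_get_possible_game_indexes data → Spec_get_possible_game_indexes data (get_possible_game_indexes data)

-- ===== LEMMAS AND PROOFS =====

-- shared item predicate: this item's count is within the bag
def okItem (p : String × Int) : Bool := decide (p.2 ≤ BAG.getD p.1 0)

-- A side: the break loop is 'possible && every item ok'
lemma revealLoopA_eq (possible : Bool) (reveal : List (String × Int)) :
    revealLoopA possible reveal = (possible && reveal.all okItem) := by
  induction reveal with
  | nil => simp [revealLoopA]
  | cons hd tl ih =>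
    obtain ⟨c, n⟩ := hd
    simp only [revealLoopA, List.all_cons, okItem]
    split_ifs with h
    · have : ¬ (n ≤ BAG.getD c 0) := by omega
      simp [this]
    · have : n ≤ BAG.getD c 0 := by omega
      rw [ih]; simp [this]

lemma foldl_and_all {α : Type} (f : α → Bool) (b : Bool) (l : List α) :
    l.foldl (fun p x => p && f x) b = (b && l.all f) := by
  induction l generalizing b with
  | nil => simp
  | cons hd tl ih => simp [List.foldl_cons, ih, Bool.and_assoc]

-- splitting okItem at a max
lemma okItem_max (c : String) (v n : Int) :
    okItem (c, max v n) = (okItem (c, v) && okItem (c, n)) := by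
  simp [okItem]

-- list core of the insert step: replacing the (unique) entry keyed c by the max
lemma all_map_replace (c : String) (v n : Int) (l : List (String × Int))
    (hnd : (l.map Prod.fst).Nodup) (hmem : (c, v) ∈ l) :
    (l.map (fun p => if p.1 == c then (c, max v n) else p)).all okItem
      = (l.all okItem && okItem (c, n)) := by
  induction l with
  | nil => simp at hmem
  | cons hd tl ih =>
    obtain ⟨k, w⟩ := hd
    simp only [List.map_cons, List.nodup_cons, List.mem_map] at hnd
    obtain ⟨hk, hndtl⟩ := hnd
    by_cases hkc : k = c
    · subst hkc
      have hw : w = v := by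
        rcases List.mem_cons.mp hmem with heq | hmem2
        · exact (Prod.mk.injEq _ _ _ _ ▸ heq).2.symm
        · exact absurd ⟨(k, v), hmem2, rfl⟩ hk
      subst hw
      have htl : tl.map (fun p => if p.1 == k then (k, max w n) else p) = tl := by
        rw [show tl = tl.map id from (List.map_id tl).symm, List.map_map]
        apply List.map_congr_left
        intro p hp
        have : p.1 ≠ k := fun h => hk ⟨p, hp, h⟩
        simp [this]
      simp only [List.map_cons, beq_self_eq_true, if_pos, List.all_cons, htl, okItem_max]
      rw [Bool.and_assoc, Bool.and_comm (okItem (k, n)), ← Bool.and_assoc]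
    · have hmem2 : (c, v) ∈ tl := by
        rcases List.mem_cons.mp hmem with heq | hmem2
        · exact absurd ((Prod.mk.injEq _ _ _ _ ▸ heq).1.symm) hkc
        · exact hmem2
      have hne : (k == c) = false := by simp [hkc]
      simp only [List.map_cons, hne, Bool.false_eq_true, List.all_cons,
        ih hndtl hmem2, Bool.and_assoc]
      simp

-- B side: one max-insert keeps 'all within bag' in sync with the item seen
lemma allWithinBag_step (d : PySem.Dict String Int) (hnd : d.keys.Nodup) (c : String) (n : Int) :
    allWithinBag (d.insert c (max (d.getD c n) n)) = (allWithinBag d && okItem (c, n)) := by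
  have hnd' : (d.items.map Prod.fst).Nodup := by
    simpa [PySem.Dict.keys] using hnd
  unfold allWithinBag
  rcases hcont : d.contains c with _ | _
  · rw [PySem.Dict.getD_of_not_contains d n hcont,
      PySem.Dict.items_insert_of_not_contains d _ hcont]
    simp [okItem]
  · obtain ⟨v, hv⟩ : ∃ v, d.get? c = some v := by
      rcases h : d.get? c with _ | v
      · rw [PySem.Dict.contains_eq_isSome_get?, h] at hcont; simp at hcont
      · exact ⟨v, rfl⟩
    rw [PySem.Dict.getD_of_get?_eq_some d n hv,
      PySem.Dict.items_insert_of_contains d _ hcont]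
    exact all_map_replace c v n d.items hnd' (PySem.Dict.mem_items_of_get?_eq_some d hv)

-- B side: folding one reveal into the max-dict
lemma allWithinBag_reveal (reveal : List (String × Int)) (d : PySem.Dict String Int)
    (hnd : d.keys.Nodup) :
    allWithinBag (reveal.foldl (fun d p => d.insert p.1 (max (d.getD p.1 p.2) p.2)) d)
      = (allWithinBag d && reveal.all okItem) := by
  induction reveal generalizing d with
  | nil => simp
  | cons hd tl ih =>
    obtain ⟨c, n⟩ := hd
    simp only [List.foldl_cons, List.all_cons]
    rw [ih _ (PySem.Dict.nodup_keys_insert d c _ hnd), allWithinBag_step d hnd c n,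
      Bool.and_assoc]

-- B side: folding a whole game
lemma allWithinBag_game (game : List (List (String × Int))) (d : PySem.Dict String Int)
    (hnd : d.keys.Nodup) :
    allWithinBag (game.foldl (fun d reveal =>
        reveal.foldl (fun d p => d.insert p.1 (max (d.getD p.1 p.2) p.2)) d) d)
      = (allWithinBag d && game.all (fun r => r.all okItem)) := by
  induction game generalizing d with
  | nil => simp
  | cons r tl ih =>
    simp only [List.foldl_cons, List.all_cons]
    have hnd' : (r.foldl (fun d p => d.insert p.1 (max (d.getD p.1 p.2) p.2)) d).keys.Nodup :=
      PySem.Dict.nodup_keys_foldl_insert_key r Prod.fst _ d hnd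
    rw [ih _ hnd', allWithinBag_reveal r d hnd, Bool.and_assoc]

-- per game, A's flag equals B's check
lemma game_flag_eq (game : List (List (String × Int))) :
    game.foldl (fun p reveal => revealLoopA p reveal) true = allWithinBag (maxesOf game) := by
  unfold maxesOf
  rw [allWithinBag_game game PySem.Dict.empty PySem.Dict.nodup_keys_empty]
  have he : allWithinBag PySem.Dict.empty = true := by decide
  rw [he, Bool.true_and]
  simp only [revealLoopA_eq]
  exact foldl_and_all (fun r => r.all okItem) true game

-- the two main loops agree (B's counter runs one ahead)
lemma gamesLoop_eq (games : List (List (List (String × Int)))) (idx : Int) (acc : List Int) :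
    gamesLoopA idx games acc = gamesLoopB (idx + 1) games acc := by
  induction games generalizing idx acc with
  | nil => rfl
  | cons game rest ih =>
    simp only [gamesLoopA, gamesLoopB, game_flag_eq]
    exact ih (idx + 1) _

-- ===== VERDICT (by name: the statement is the Claim_ definition above) =====
theorem get_possible_game_indexes_spec : Claim_equal_get_possible_game_indexes := by
  intro data _ _
  unfold Spec_get_possible_game_indexes get_possible_game_indexes get_possible_game_indexes_alt
  exact gamesLoop_eq data 0 []
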